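-- pv_equiv track=rewrite | github.com/cyberphantom52/Google-FooBar | Level-4/Question-1.py | get_path_time
-- ===== SOURCE A (Python) =====
-- def get_path_time(bunnies, distance_matrix):
--   # Start to bunny
--   time = distance_matrix[0][bunnies[0]]
--
--   # Between bunnies
--   for i in range(1, len(bunnies)):
--     start = bunnies[i - 1]
--     end = bunnies[i]
--     time += distance_matrix[start][end]
--
--   # Bunny to bulkhead
--   time += distance_matrix[bunnies[-1]][len(distance_matrix)-1]
--
--   return time
-- ===== SOURCE B (Python) =====
-- def get_path_time(bunnies, distance_matrix):
--     # Recursive walker: carry the current node, consume the remaining bunny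
--     # list; when it is exhausted, take the final edge to the bulkhead.
--     def walk(cur, rest):
--         if not rest:
--             return distance_matrix[cur][len(distance_matrix) - 1]
--         nxt = rest[0]
--         return distance_matrix[cur][nxt] + walk(nxt, rest[1:])
--     return walk(0, list(bunnies))
-- ===== Notes on version B (the rewrite author's own statement) =====
-- stated objective: alternative
-- what changed: B replaces A's three special-cased segments (start edge, index loop over positions 1..k-1, final bulkhead edge) by a recursive walker that carries the current node and consumes the bunny list structurally, taking the bulkhead edge in its base case.
import Mathlib
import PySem

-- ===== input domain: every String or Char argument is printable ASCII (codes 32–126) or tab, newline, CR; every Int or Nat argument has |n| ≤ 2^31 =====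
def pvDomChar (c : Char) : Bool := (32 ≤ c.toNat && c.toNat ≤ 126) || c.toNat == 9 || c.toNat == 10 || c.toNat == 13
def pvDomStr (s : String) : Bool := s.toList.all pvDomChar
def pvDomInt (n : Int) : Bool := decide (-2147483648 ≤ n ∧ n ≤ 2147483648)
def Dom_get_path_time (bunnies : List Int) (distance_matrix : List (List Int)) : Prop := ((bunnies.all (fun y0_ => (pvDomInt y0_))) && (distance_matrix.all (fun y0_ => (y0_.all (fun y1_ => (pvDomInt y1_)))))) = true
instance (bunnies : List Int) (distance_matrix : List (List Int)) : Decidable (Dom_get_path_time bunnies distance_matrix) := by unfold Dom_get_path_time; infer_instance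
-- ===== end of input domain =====

-- B replaces A's three special-cased segments by a recursive walker over the bunny list (alternative decomposition, same cost). Pre_ excludes exactly the inputs where A raises IndexError.


-- ===== PORT A =====
-- literal transliteration of A; pyGetD totalizes the indexing (the default is
-- never reached on inputs satisfying Pre_, which excludes exactly Python's IndexErrors)
def get_path_time (bunnies : List Int) (distance_matrix : List (List Int)) : Int :=
  -- time = distance_matrix[0][bunnies[0]]
  let time : Int :=
    PySem.List.pyGetD (PySem.List.pyGetD distance_matrix 0 []) (PySem.List.pyGetD bunnies 0 0) 0
  -- for i in range(1, len(bunnies)): time += distance_matrix[bunnies[i-1]][bunnies[i]]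
  let time :=
    (PySem.List.pyRange 1 bunnies.length 1).foldl
      (fun t i =>
        let start := PySem.List.pyGetD bunnies (i - 1) 0
        let «end» := PySem.List.pyGetD bunnies i 0
        t + PySem.List.pyGetD (PySem.List.pyGetD distance_matrix start []) «end» 0) time
  -- time += distance_matrix[bunnies[-1]][len(distance_matrix)-1]
  time + PySem.List.pyGetD
          (PySem.List.pyGetD distance_matrix (PySem.List.pyGetD bunnies (-1) 0) [])
          ((distance_matrix.length : Int) - 1) 0

-- ===== PORT B =====
-- the recursive walker 'walk(cur, rest)' from Source B, step for step
def pvWalk (distance_matrix : List (List Int)) (cur : Int) (rest : List Int) : Int :=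
  match rest with
  | [] =>
      PySem.List.pyGetD (PySem.List.pyGetD distance_matrix cur [])
        ((distance_matrix.length : Int) - 1) 0
  | nxt :: tail =>
      PySem.List.pyGetD (PySem.List.pyGetD distance_matrix cur []) nxt 0
        + pvWalk distance_matrix nxt tail

def get_path_time_alt (bunnies : List Int) (distance_matrix : List (List Int)) : Int :=
  pvWalk distance_matrix 0 bunnies

-- ===== PRECONDITION & SPEC =====
-- Pre_ excludes exactly the inputs where Python A raises IndexError: empty bunnies
-- (bunnies[0]), or some consulted row/column index out of range.
def Pre_get_path_time (bunnies : List Int) (distance_matrix : List (List Int)) : Prop :=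
  bunnies ≠ [] ∧
  (∀ p ∈ (let path : List Int := 0 :: bunnies ++ [(distance_matrix.length : Int) - 1]
          path.zip path.tail),
     PySem.Raise.InRange distance_matrix.length p.1 ∧
     PySem.Raise.InRange (PySem.List.pyGetD distance_matrix p.1 []).length p.2)
instance (bunnies : List Int) (distance_matrix : List (List Int)) : Decidable (Pre_get_path_time bunnies distance_matrix) := by unfold Pre_get_path_time; infer_instance

def pvWitness_get_path_time : List Int × List (List Int) := ([0], [[0, 1], [2, 3]])

def Spec_get_path_time (bunnies : List Int) (distance_matrix : List (List Int)) (out : Int) : Prop := out = get_path_time_alt bunnies distance_matrix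
instance (bunnies : List Int) (distance_matrix : List (List Int)) (out : Int) : Decidable (Spec_get_path_time bunnies distance_matrix out) := by unfold Spec_get_path_time; infer_instance

-- ===== CLAIM (what is proved, stated in full; the proofs are below) =====
def Claim_equal_get_path_time : Prop := ∀ (bunnies : List Int) (distance_matrix : List (List Int)), Dom_get_path_time bunnies distance_matrix → Pre_get_path_time bunnies distance_matrix → Spec_get_path_time bunnies distance_matrix (get_path_time bunnies distance_matrix)

-- ===== LEMMAS AND PROOFS =====

-- edge weight looked up by both ports
def pvEdge (dm : List (List Int)) (a b : Int) : Int :=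
  PySem.List.pyGetD (PySem.List.pyGetD dm a []) b 0

-- A's index loop over a shifted list: peel one step
theorem pvAloopShift (dm : List (List Int)) (x y : Int) (bs : List Int) (acc : Int) :
    (PySem.List.pyRange 1 (x :: y :: bs).length 1).foldl
      (fun t i => t + pvEdge dm (PySem.List.pyGetD (x :: y :: bs) (i - 1) 0)
                        (PySem.List.pyGetD (x :: y :: bs) i 0)) acc
    = (PySem.List.pyRange 1 (y :: bs).length 1).foldl
      (fun t i => t + pvEdge dm (PySem.List.pyGetD (y :: bs) (i - 1) 0)
                        (PySem.List.pyGetD (y :: bs) i 0)) (acc + pvEdge dm x y) := by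
  rw [PySem.List.pyRange_one_cons (by simp)]
  simp only [List.foldl_cons]
  have h1 : PySem.List.pyGetD (x :: y :: bs) (1 - 1 : Int) 0 = x := by
    simp [PySem.List.pyGetD_zero_cons]
  have h2 : PySem.List.pyGetD (x :: y :: bs) (1 : Int) 0 = y := by
    have := PySem.List.pyGetD_natCast (xs := x :: y :: bs) (n := 1) (d := (0:Int))
    simpa using this
  rw [h1, h2]
  have hx : ((x :: y :: bs).length : Int) = ((y :: bs).length : Int) + 1 := by simp
  rw [hx, PySem.List.pyRange_one, PySem.List.pyRange_one, List.foldl_map, List.foldl_map]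
  have hlen : (((y :: bs).length : Int) + 1 - (1 + 1)).toNat = (((y :: bs).length : Int) - 1).toNat := by
    omega
  rw [hlen]
  congr 1
  funext t k
  have e1 : (1 + 1 + (k : Int) - 1) = ((k + 1 : Nat) : Int) := by push_cast; ring
  have e2 : (1 + 1 + (k : Int)) = ((k + 2 : Nat) : Int) := by push_cast; ring
  have e3 : (1 + (k : Int) - 1) = ((k : Nat) : Int) := by omega
  have e4 : (1 + (k : Int)) = ((k + 1 : Nat) : Int) := by push_cast; ring
  rw [e1, e2, e3, e4]
  simp only [PySem.List.pyGetD_natCast]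
  simp [List.getD]

-- A's loop + final edge equals B's walker
theorem pvAwalk (dm : List (List Int)) (bs : List Int) :
    ∀ (x acc : Int),
      (PySem.List.pyRange 1 (x :: bs).length 1).foldl
        (fun t i => t + pvEdge dm (PySem.List.pyGetD (x :: bs) (i - 1) 0)
                          (PySem.List.pyGetD (x :: bs) i 0)) acc
        + pvEdge dm ((x :: bs).getLast (by simp)) ((dm.length : Int) - 1)
      = acc + pvWalk dm x bs := by
  induction bs with
  | nil =>
      intro x acc
      simp [PySem.List.pyRange_one_eq_nil, pvWalk, pvEdge]
  | cons y bs' ih =>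
      intro x acc
      rw [pvAloopShift]
      have hlast : (x :: y :: bs').getLast (by simp) = (y :: bs').getLast (by simp) := by
        simp [List.getLast]
      rw [hlast, ih y (acc + pvEdge dm x y)]
      simp [pvWalk, pvEdge, add_assoc]

-- ===== VERDICT (by name: the statement is the Claim_ definition above) =====
theorem get_path_time_spec : Claim_equal_get_path_time := by
  intro bunnies dm _ hpre
  unfold Spec_get_path_time get_path_time get_path_time_alt
  obtain ⟨b0, bs, rfl⟩ : ∃ b0 bs, bunnies = b0 :: bs := by
    cases bunnies with
    | nil => exact absurd rfl hpre.1
    | cons a l => exact ⟨a, l, rfl⟩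
  simp only []
  have hneg : PySem.List.pyGetD (b0 :: bs) (-1) (0:Int) = (b0 :: bs).getLast (List.cons_ne_nil b0 bs) :=
    PySem.List.pyGetD_neg_one (b0 :: bs) (0:Int) (List.cons_ne_nil b0 bs)
  have h0 : PySem.List.pyGetD (b0 :: bs) (0:Int) (0:Int) = b0 :=
    PySem.List.pyGetD_zero_cons b0 bs 0
  rw [hneg, h0]
  have := pvAwalk dm bs b0 (pvEdge dm 0 b0)
  simp only [pvEdge] at this
  rw [this]
  simp [pvWalk]
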